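-- pv_equiv track=rewrite | github.com/tianhm/gptme | gptme/tools/shell.py | _find_first_unquoted_pipe
-- ===== SOURCE A (Python) =====
-- def _find_quotes(cmd: str) -> list[tuple[int, int]]:
--     """Find all quoted regions in a command string.
--
--     Returns a list of (start, end) tuples for each quoted region.
--     """
--     quoted_regions = []
--     in_single = False
--     in_double = False
--     start = -1
--
--     i = 0
--     while i < len(cmd):
--         c = cmd[i]
--
--         # Handle escape sequences
--         if c == "\\" and i + 1 < len(cmd):
--             i += 2
--             continue
--
--         # Handle single quotes
--         if c == "'" and not in_double:
--             if not in_single: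
--                 start = i
--                 in_single = True
--             else:
--                 quoted_regions.append((start, i + 1))
--                 in_single = False
--
--         # Handle double quotes
--         elif c == '"' and not in_single:
--             if not in_double:
--                 start = i
--                 in_double = True
--             else:
--                 quoted_regions.append((start, i + 1))
--                 in_double = False
--
--         i += 1
--
--     return quoted_regions
--
-- def _is_in_quoted_region(pos: int, quoted_regions: list[tuple[int, int]]) -> bool:
--     """Check if a position is within any quoted region."""
--     for start, end in quoted_regions:
--         if start <= pos < end:
--             return True
--     return False
--
-- def _find_first_unquoted_pipe(command: str) -> int | None:
--     """Find the position of the first pipe operator that's not in quotes.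
--
--     Returns None if no unquoted pipe is found.
--     Skips logical OR operators (||).
--     """
--     quoted_regions = _find_quotes(command)
--
--     pos = 0
--     while True:
--         pipe_pos = command.find("|", pos)
--         if pipe_pos == -1:
--             return None
--
--         # Check if this pipe is inside quotes
--         if not _is_in_quoted_region(pipe_pos, quoted_regions):
--             # Check if this is part of || (logical OR)
--             if pipe_pos + 1 < len(command) and command[pipe_pos + 1] == "|":
--                 # Skip the || operator
--                 pos = pipe_pos + 2
--                 continue
--
--             return pipe_pos
--
--         # Try next pipe
--         pos = pipe_pos + 1
-- ===== SOURCE B (Python) =====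
-- def _find_first_unquoted_pipe(command: str) -> int | None:
--     """Find the position of the first pipe operator that's not in quotes.
--
--     Two linear passes: first build a per-position mask of the characters
--     covered by completed quoted regions, then scan for the first pipe that
--     is not masked, skipping '||' (logical OR).
--     """
--     n = len(command)
--     quoted = [False] * n
--     in_quote = ""  # the currently open quote character, if any
--     start = 0
--     i = 0
--     while i < n:
--         c = command[i]
--         if c == "\\" and i + 1 < n:
--             i += 2
--             continue
--         if c in "'\"":
--             if not in_quote:
--                 in_quote = c
--                 start = i
--             elif c == in_quote:
--                 for j in range(start, i + 1):
--                     quoted[j] = True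
--                 in_quote = ""
--         i += 1
--
--     i = 0
--     while i < n:
--         if command[i] == "|" and not quoted[i]:
--             if i + 1 < n and command[i + 1] == "|":
--                 i += 2
--                 continue
--             return i
--         i += 1
--     return None
-- ===== Notes on version B (the rewrite author's own statement) =====
-- stated objective: alternative
-- what changed: A collects a list of completed quoted regions and repeatedly calls str.find, testing each pipe against every region; B builds a per-position boolean mask of quoted characters in one pass and then does a single forward scan returning the first unmasked pipe (skipping '||'), removing the per-pipe scan over the region list.
import Mathlib
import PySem

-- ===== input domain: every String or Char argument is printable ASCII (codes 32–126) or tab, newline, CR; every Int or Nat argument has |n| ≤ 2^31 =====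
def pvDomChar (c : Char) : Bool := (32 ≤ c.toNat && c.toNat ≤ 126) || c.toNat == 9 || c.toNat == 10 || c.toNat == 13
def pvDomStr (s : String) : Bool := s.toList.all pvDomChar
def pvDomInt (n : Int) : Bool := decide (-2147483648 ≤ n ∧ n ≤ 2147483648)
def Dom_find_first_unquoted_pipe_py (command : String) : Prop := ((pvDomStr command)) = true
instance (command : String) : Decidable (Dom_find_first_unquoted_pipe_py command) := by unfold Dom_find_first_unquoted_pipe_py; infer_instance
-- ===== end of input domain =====

-- B replaces A's region-list + repeated str.find algorithm by a per-position quoted mask built in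
-- one pass, followed by a single forward scan for the first unmasked pipe (objective: alternative
-- traversal; return value only, no side effects involved).

-- ===== PORT A =====
-- Port of _find_quotes: state machine collecting completed quoted regions.
def pvFindQ (cs : List Char) (i : Nat) (ins ind : Bool) (st : Int) (acc : List (Int × Int)) : List (Int × Int) :=
  if _h : i < cs.length then
    if cs.getD i ' ' = '\\' ∧ i + 1 < cs.length then
      pvFindQ cs (i + 2) ins ind st acc
    else if cs.getD i ' ' = '\'' ∧ ind = false then
      if ins = false then pvFindQ cs (i + 1) true ind ((i : Int)) acc
      else pvFindQ cs (i + 1) false ind st (acc ++ [(st, (i : Int) + 1)])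
    else if cs.getD i ' ' = '"' ∧ ins = false then
      if ind = false then pvFindQ cs (i + 1) ins true ((i : Int)) acc
      else pvFindQ cs (i + 1) ins false st (acc ++ [(st, (i : Int) + 1)])
    else pvFindQ cs (i + 1) ins ind st acc
  else acc
termination_by cs.length - i
decreasing_by all_goals omega

-- Port of _is_in_quoted_region.
def pvInQ (pos : Int) (regions : List (Int × Int)) : Bool :=
  match regions with
  | [] => false
  | (s, e) :: rest => if s ≤ pos ∧ pos < e then true else pvInQ pos rest

-- Hand port of command.find("|", pos): first index ≥ pos holding '|', else -1 (exact).
def pvFind (cs : List Char) (i : Nat) : Int :=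
  if _h : i < cs.length then
    if cs.getD i ' ' = '|' then (i : Int) else pvFind cs (i + 1)
  else -1
termination_by cs.length - i

-- needed by pvScanA's termination (cited in decreasing_by)
theorem pvFind_pos (cs : List Char) (i : Nat) (h : pvFind cs i ≠ -1) :
    i ≤ (pvFind cs i).toNat ∧ (pvFind cs i).toNat < cs.length := by
  induction i using pvFind.induct cs with
  | case1 i h1 hc =>
      rw [pvFind, dif_pos h1, if_pos hc]
      simp
      omega
  | case2 i h1 hc ih =>
      have e : pvFind cs i = pvFind cs (i + 1) := by
        conv_lhs => rw [pvFind]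
        rw [dif_pos h1, if_neg hc]
      rw [e] at h ⊢
      have := ih h
      omega
  | case3 i h1 =>
      rw [pvFind, dif_neg h1] at h
      simp at h

-- Port of the main while-loop of _find_first_unquoted_pipe.
def pvScanA (cs : List Char) (pos : Nat) (R : List (Int × Int)) : Option Int :=
  if hp : pvFind cs pos = -1 then none
  else
    if pvInQ (pvFind cs pos) R = false then
      if pvFind cs pos + 1 < (cs.length : Int) ∧ cs.getD ((pvFind cs pos).toNat + 1) ' ' = '|' then
        pvScanA cs ((pvFind cs pos).toNat + 2) R
      else some (pvFind cs pos)
    else pvScanA cs ((pvFind cs pos).toNat + 1) R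
termination_by cs.length - pos
decreasing_by
  · have := pvFind_pos cs pos hp; omega
  · have := pvFind_pos cs pos hp; omega

def find_first_unquoted_pipe_py (command : String) : Option Int :=
  pvScanA command.toList 0 (pvFindQ command.toList 0 false false (-1) [])

-- ===== PORT B =====
-- Pass 1 helper: the mark loop 'for j in range(start, i + 1): quoted[j] = True'.
def pvMark (q : List Bool) (a b : Nat) : List Bool :=
  if a < b then pvMark (q.set a true) (a + 1) b else q
termination_by b - a

-- Pass 1: build the per-position mask of characters inside completed quoted regions.
def pvMask (cs : List Char) (i : Nat) (inq : Option Char) (start : Nat) (q : List Bool) : List Bool :=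
  if _h : i < cs.length then
    if cs.getD i ' ' = '\\' ∧ i + 1 < cs.length then pvMask cs (i + 2) inq start q
    else if cs.getD i ' ' = '\'' ∨ cs.getD i ' ' = '"' then
      match inq with
      | none => pvMask cs (i + 1) (some (cs.getD i ' ')) i q
      | some qc =>
          if cs.getD i ' ' = qc then pvMask cs (i + 1) none start (pvMark q start (i + 1))
          else pvMask cs (i + 1) inq start q
    else pvMask cs (i + 1) inq start q
  else q
termination_by cs.length - i
decreasing_by all_goals omega

-- Pass 2: first pipe whose position is not masked, skipping '||'.
def pvScanB (cs : List Char) (q : List Bool) (i : Nat) : Option Int :=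
  if _h : i < cs.length then
    if cs.getD i ' ' = '|' ∧ q.getD i false = false then
      if i + 1 < cs.length ∧ cs.getD (i + 1) ' ' = '|' then pvScanB cs q (i + 2)
      else some (i : Int)
    else pvScanB cs q (i + 1)
  else none
termination_by cs.length - i

def find_first_unquoted_pipe_py_alt (command : String) : Option Int :=
  pvScanB command.toList (pvMask command.toList 0 none 0 (List.replicate command.toList.length false)) 0

-- ===== PRECONDITION & SPEC =====
def Spec_find_first_unquoted_pipe_py (command : String) (out : Option Int) : Prop := out = find_first_unquoted_pipe_py_alt command
instance (command : String) (out : Option Int) : Decidable (Spec_find_first_unquoted_pipe_py command out) := by unfold Spec_find_first_unquoted_pipe_py; infer_instance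

-- ===== CLAIM (what is proved, stated in full; the proofs are below) =====
def Claim_equal_find_first_unquoted_pipe_py : Prop := ∀ (command : String), Dom_find_first_unquoted_pipe_py command → Spec_find_first_unquoted_pipe_py command (find_first_unquoted_pipe_py command)

-- ===== LEMMAS AND PROOFS =====

theorem pvNeOf {c d e : Char} (h : c = d) (hne : d ≠ e) : c ≠ e := by
  rw [h]; exact hne

-- Proof-side helper: position at which the currently open quote q closes (per the scan rules).
def pvClose (cs : List Char) (q : Char) (i : Nat) : Option Nat :=
  if _h : i < cs.length then
    if cs.getD i ' ' = '\\' ∧ i + 1 < cs.length then pvClose cs q (i + 2)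
    else if cs.getD i ' ' = q then some i
    else pvClose cs q (i + 1)
  else none
termination_by cs.length - i
decreasing_by all_goals omega

-- ---- pvFind stepping ----

theorem pvFind_ge (cs : List Char) (i : Nat) (h : cs.length ≤ i) : pvFind cs i = -1 := by
  rw [pvFind, dif_neg (by omega)]

theorem pvFind_step (cs : List Char) (i : Nat) (h : i < cs.length) (hc : cs.getD i ' ' ≠ '|') :
    pvFind cs i = pvFind cs (i + 1) := by
  conv_lhs => rw [pvFind]
  rw [dif_pos h, if_neg hc]

theorem pvFind_pipe (cs : List Char) (i : Nat) (h : i < cs.length) (hc : cs.getD i ' ' = '|') :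
    pvFind cs i = (i : Int) := by
  rw [pvFind, dif_pos h, if_pos hc]

-- ---- pvClose stepping ----

theorem pvClose_ge (cs : List Char) (q : Char) (i : Nat) (h : cs.length ≤ i) :
    pvClose cs q i = none := by
  rw [pvClose, dif_neg (by omega)]

theorem pvClose_bs (cs : List Char) (q : Char) (i : Nat) (h : i < cs.length)
    (hc : cs.getD i ' ' = '\\') (h1 : i + 1 < cs.length) : pvClose cs q i = pvClose cs q (i + 2) := by
  conv_lhs => rw [pvClose]
  rw [dif_pos h, if_pos ⟨hc, h1⟩]

theorem pvClose_step (cs : List Char) (q : Char) (i : Nat) (h : i < cs.length)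
    (hbs : ¬(cs.getD i ' ' = '\\' ∧ i + 1 < cs.length)) (hq : cs.getD i ' ' ≠ q) :
    pvClose cs q i = pvClose cs q (i + 1) := by
  conv_lhs => rw [pvClose]
  rw [dif_pos h, if_neg hbs, if_neg hq]

theorem pvClose_self (cs : List Char) (q : Char) (i : Nat) (h : i < cs.length)
    (hbs : ¬(cs.getD i ' ' = '\\' ∧ i + 1 < cs.length)) (hq : cs.getD i ' ' = q) :
    pvClose cs q i = some i := by
  rw [pvClose, dif_pos h, if_neg hbs, if_pos hq]

theorem pvClose_spec (cs : List Char) (q : Char) :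
    ∀ k i j, cs.length - i ≤ k → pvClose cs q i = some j →
      i ≤ j ∧ j < cs.length ∧ cs.getD j ' ' = q := by
  intro k
  induction k with
  | zero =>
      intro i j hk hcl
      rw [pvClose_ge cs q i (by omega)] at hcl
      cases hcl
  | succ k ih =>
      intro i j hk hcl
      by_cases hl : i < cs.length
      · by_cases hbs : cs.getD i ' ' = '\\' ∧ i + 1 < cs.length
        · rw [pvClose_bs cs q i hl hbs.1 hbs.2] at hcl
          obtain ⟨a1, a2, a3⟩ := ih (i + 2) j (by omega) hcl
          exact ⟨by omega, a2, a3⟩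
        · by_cases hq : cs.getD i ' ' = q
          · rw [pvClose_self cs q i hl hbs hq] at hcl
            injection hcl with hji
            subst hji
            exact ⟨le_refl _, hl, hq⟩
          · rw [pvClose_step cs q i hl hbs hq] at hcl
            obtain ⟨a1, a2, a3⟩ := ih (i + 1) j (by omega) hcl
            exact ⟨by omega, a2, a3⟩
      · rw [pvClose_ge cs q i (by omega)] at hcl
        cases hcl

-- ---- pvFindQ stepping ----

theorem pvFindQ_ge (cs : List Char) (i : Nat) (ins ind : Bool) (st : Int) (acc : List (Int × Int))
    (h : cs.length ≤ i) : pvFindQ cs i ins ind st acc = acc := by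
  rw [pvFindQ, dif_neg (by omega)]

theorem pvFindQ_bs (cs : List Char) (i : Nat) (ins ind : Bool) (st : Int) (acc : List (Int × Int))
    (h : i < cs.length) (hc : cs.getD i ' ' = '\\') (h1 : i + 1 < cs.length) :
    pvFindQ cs i ins ind st acc = pvFindQ cs (i + 2) ins ind st acc := by
  conv_lhs => rw [pvFindQ]
  rw [dif_pos h, if_pos ⟨hc, h1⟩]

theorem pvFindQ_default (cs : List Char) (i : Nat) (st : Int) (acc : List (Int × Int))
    (h : i < cs.length) (hbs : ¬(cs.getD i ' ' = '\\' ∧ i + 1 < cs.length))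
    (h1 : cs.getD i ' ' ≠ '\'') (h2 : cs.getD i ' ' ≠ '"') :
    pvFindQ cs i false false st acc = pvFindQ cs (i + 1) false false st acc := by
  conv_lhs => rw [pvFindQ]
  rw [dif_pos h, if_neg hbs, if_neg (fun hh => h1 hh.1), if_neg (fun hh => h2 hh.1)]

theorem pvFindQ_enterS (cs : List Char) (i : Nat) (st : Int) (acc : List (Int × Int))
    (h : i < cs.length) (hbs : ¬(cs.getD i ' ' = '\\' ∧ i + 1 < cs.length))
    (hq : cs.getD i ' ' = '\'') :
    pvFindQ cs i false false st acc = pvFindQ cs (i + 1) true false ((i : Int)) acc := by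
  conv_lhs => rw [pvFindQ]
  rw [dif_pos h, if_neg hbs, if_pos ⟨hq, rfl⟩, if_pos rfl]

theorem pvFindQ_enterD (cs : List Char) (i : Nat) (st : Int) (acc : List (Int × Int))
    (h : i < cs.length) (hbs : ¬(cs.getD i ' ' = '\\' ∧ i + 1 < cs.length))
    (hq : cs.getD i ' ' = '"') :
    pvFindQ cs i false false st acc = pvFindQ cs (i + 1) false true ((i : Int)) acc := by
  conv_lhs => rw [pvFindQ]
  rw [dif_pos h, if_neg hbs, if_neg (fun hh => absurd hh.1 (pvNeOf hq (by decide))), if_pos ⟨hq, rfl⟩, if_pos rfl]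

theorem pvFindQ_acc (cs : List Char) :
    ∀ k i ins ind st acc, cs.length - i ≤ k →
      pvFindQ cs i ins ind st acc = acc ++ pvFindQ cs i ins ind st [] := by
  intro k
  induction k with
  | zero =>
      intro i ins ind st acc hk
      rw [pvFindQ_ge cs i ins ind st acc (by omega), pvFindQ_ge cs i ins ind st [] (by omega)]
      simp
  | succ k ih =>
      intro i ins ind st acc hk
      by_cases hl : i < cs.length
      · conv_lhs => rw [pvFindQ]
        conv_rhs => rw [pvFindQ]
        rw [dif_pos hl, dif_pos hl]
        split_ifs with h1 h2 h3 h4 h5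
        · exact ih (i + 2) ins ind st acc (by omega)
        · exact ih (i + 1) true ind ((i : Int)) acc (by omega)
        · rw [ih (i + 1) false ind st (acc ++ [(st, (i : Int) + 1)]) (by omega),
            ih (i + 1) false ind st ([] ++ [(st, (i : Int) + 1)]) (by omega)]
          simp
        · exact ih (i + 1) ins true ((i : Int)) acc (by omega)
        · rw [ih (i + 1) ins false st (acc ++ [(st, (i : Int) + 1)]) (by omega),
            ih (i + 1) ins false st ([] ++ [(st, (i : Int) + 1)]) (by omega)]
          simp
        · exact ih (i + 1) ins ind st acc (by omega)
      · rw [pvFindQ_ge cs i ins ind st acc (by omega), pvFindQ_ge cs i ins ind st [] (by omega)]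
        simp

theorem pvFindQ_openS_some (cs : List Char) :
    ∀ k i j st acc, cs.length - i ≤ k → pvClose cs '\'' i = some j →
      pvFindQ cs i true false st acc = pvFindQ cs (j + 1) false false st (acc ++ [(st, (j : Int) + 1)]) := by
  intro k
  induction k with
  | zero =>
      intro i j st acc hk hcl
      rw [pvClose_ge cs '\'' i (by omega)] at hcl
      cases hcl
  | succ k ih =>
      intro i j st acc hk hcl
      by_cases hl : i < cs.length
      · by_cases hbs : cs.getD i ' ' = '\\' ∧ i + 1 < cs.length
        · rw [pvClose_bs cs '\'' i hl hbs.1 hbs.2] at hcl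
          rw [pvFindQ_bs cs i true false st acc hl hbs.1 hbs.2]
          exact ih (i + 2) j st acc (by omega) hcl
        · by_cases hq : cs.getD i ' ' = '\''
          · rw [pvClose_self cs '\'' i hl hbs hq] at hcl
            injection hcl with hji
            subst hji
            conv_lhs => rw [pvFindQ]
            rw [dif_pos hl, if_neg hbs, if_pos ⟨hq, rfl⟩, if_neg (by simp)]
          · rw [pvClose_step cs '\'' i hl hbs hq] at hcl
            conv_lhs => rw [pvFindQ]
            rw [dif_pos hl, if_neg hbs, if_neg (fun hh => hq hh.1)]
            rw [if_neg (fun hh => Bool.noConfusion hh.2)]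
            exact ih (i + 1) j st acc (by omega) hcl
      · rw [pvClose_ge cs '\'' i (by omega)] at hcl
        cases hcl

theorem pvFindQ_openS_none (cs : List Char) :
    ∀ k i st acc, cs.length - i ≤ k → pvClose cs '\'' i = none →
      pvFindQ cs i true false st acc = acc := by
  intro k
  induction k with
  | zero =>
      intro i st acc hk _
      exact pvFindQ_ge cs i true false st acc (by omega)
  | succ k ih =>
      intro i st acc hk hcl
      by_cases hl : i < cs.length
      · by_cases hbs : cs.getD i ' ' = '\\' ∧ i + 1 < cs.length
        · rw [pvClose_bs cs '\'' i hl hbs.1 hbs.2] at hcl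
          rw [pvFindQ_bs cs i true false st acc hl hbs.1 hbs.2]
          exact ih (i + 2) st acc (by omega) hcl
        · by_cases hq : cs.getD i ' ' = '\''
          · rw [pvClose_self cs '\'' i hl hbs hq] at hcl
            cases hcl
          · rw [pvClose_step cs '\'' i hl hbs hq] at hcl
            conv_lhs => rw [pvFindQ]
            rw [dif_pos hl, if_neg hbs, if_neg (fun hh => hq hh.1)]
            rw [if_neg (fun hh => Bool.noConfusion hh.2)]
            exact ih (i + 1) st acc (by omega) hcl
      · exact pvFindQ_ge cs i true false st acc (by omega)

theorem pvFindQ_openD_some (cs : List Char) :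
    ∀ k i j st acc, cs.length - i ≤ k → pvClose cs '"' i = some j →
      pvFindQ cs i false true st acc = pvFindQ cs (j + 1) false false st (acc ++ [(st, (j : Int) + 1)]) := by
  intro k
  induction k with
  | zero =>
      intro i j st acc hk hcl
      rw [pvClose_ge cs '"' i (by omega)] at hcl
      cases hcl
  | succ k ih =>
      intro i j st acc hk hcl
      by_cases hl : i < cs.length
      · by_cases hbs : cs.getD i ' ' = '\\' ∧ i + 1 < cs.length
        · rw [pvClose_bs cs '"' i hl hbs.1 hbs.2] at hcl
          rw [pvFindQ_bs cs i false true st acc hl hbs.1 hbs.2]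
          exact ih (i + 2) j st acc (by omega) hcl
        · by_cases hq : cs.getD i ' ' = '"'
          · rw [pvClose_self cs '"' i hl hbs hq] at hcl
            injection hcl with hji
            subst hji
            conv_lhs => rw [pvFindQ]
            rw [dif_pos hl, if_neg hbs, if_neg (fun hh => absurd hh.1 (pvNeOf hq (by decide))), if_pos ⟨hq, rfl⟩, if_neg (by simp)]
          · rw [pvClose_step cs '"' i hl hbs hq] at hcl
            conv_lhs => rw [pvFindQ]
            rw [dif_pos hl, if_neg hbs, if_neg (by simp), if_neg (fun hh => hq hh.1)]
            exact ih (i + 1) j st acc (by omega) hcl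
      · rw [pvClose_ge cs '"' i (by omega)] at hcl
        cases hcl

theorem pvFindQ_openD_none (cs : List Char) :
    ∀ k i st acc, cs.length - i ≤ k → pvClose cs '"' i = none →
      pvFindQ cs i false true st acc = acc := by
  intro k
  induction k with
  | zero =>
      intro i st acc hk _
      exact pvFindQ_ge cs i false true st acc (by omega)
  | succ k ih =>
      intro i st acc hk hcl
      by_cases hl : i < cs.length
      · by_cases hbs : cs.getD i ' ' = '\\' ∧ i + 1 < cs.length
        · rw [pvClose_bs cs '"' i hl hbs.1 hbs.2] at hcl
          rw [pvFindQ_bs cs i false true st acc hl hbs.1 hbs.2]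
          exact ih (i + 2) st acc (by omega) hcl
        · by_cases hq : cs.getD i ' ' = '"'
          · rw [pvClose_self cs '"' i hl hbs hq] at hcl
            cases hcl
          · rw [pvClose_step cs '"' i hl hbs hq] at hcl
            conv_lhs => rw [pvFindQ]
            rw [dif_pos hl, if_neg hbs, if_neg (by simp), if_neg (fun hh => hq hh.1)]
            exact ih (i + 1) st acc (by omega) hcl
      · exact pvFindQ_ge cs i false true st acc (by omega)

-- ---- pvMark ----

theorem pvMark_length_fuel (b : Nat) :
    ∀ k a (q : List Bool), b - a ≤ k → (pvMark q a b).length = q.length := by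
  intro k
  induction k with
  | zero =>
      intro a q hk
      rw [pvMark, if_neg (by omega)]
  | succ k ih =>
      intro a q hk
      by_cases h : a < b
      · rw [pvMark, if_pos h, ih (a + 1) (q.set a true) (by omega), List.length_set]
      · rw [pvMark, if_neg h]

theorem pvMark_length (q : List Bool) (a b : Nat) : (pvMark q a b).length = q.length :=
  pvMark_length_fuel b b a q (by omega)

theorem pvSet_getD (q : List Bool) (a p : Nat) (hp : p < q.length) :
    (q.set a true).getD p false = if p = a then true else q.getD p false := by
  by_cases he : p = a
  · subst he
    rw [if_pos rfl]
    simp [List.getD_eq_getElem?_getD, List.getElem?_set_self hp]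
  · rw [if_neg he]
    simp [List.getD_eq_getElem?_getD, List.getElem?_set_ne (fun hh => he hh.symm)]

theorem pvMark_getD_fuel (b p : Nat) :
    ∀ k a (q : List Bool), b - a ≤ k → p < q.length →
      (pvMark q a b).getD p false = if a ≤ p ∧ p < b then true else q.getD p false := by
  intro k
  induction k with
  | zero =>
      intro a q hk hp
      rw [pvMark, if_neg (by omega), if_neg (by omega)]
  | succ k ih =>
      intro a q hk hp
      by_cases h : a < b
      · rw [pvMark, if_pos h,
          ih (a + 1) (q.set a true) (by omega) (by rw [List.length_set]; exact hp),
          pvSet_getD q a p hp]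
        split_ifs with h1 h2 h3 h4 h5 <;> first | rfl | omega
      · rw [pvMark, if_neg h, if_neg (by omega)]

theorem pvMark_getD (q : List Bool) (a b p : Nat) (hp : p < q.length) :
    (pvMark q a b).getD p false = if a ≤ p ∧ p < b then true else q.getD p false :=
  pvMark_getD_fuel b p b a q (by omega) hp

-- ---- pvMask stepping ----

theorem pvMask_ge (cs : List Char) (i : Nat) (inq : Option Char) (start : Nat) (q : List Bool)
    (h : cs.length ≤ i) : pvMask cs i inq start q = q := by
  rw [pvMask.eq_def, dif_neg (by omega)]

theorem pvMask_bs (cs : List Char) (i : Nat) (inq : Option Char) (start : Nat) (q : List Bool)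
    (h : i < cs.length) (hc : cs.getD i ' ' = '\\') (h1 : i + 1 < cs.length) :
    pvMask cs i inq start q = pvMask cs (i + 2) inq start q := by
  conv_lhs => rw [pvMask.eq_def]
  rw [dif_pos h, if_pos ⟨hc, h1⟩]

theorem pvMask_enter (cs : List Char) (i : Nat) (start : Nat) (q : List Bool)
    (h : i < cs.length) (hbs : ¬(cs.getD i ' ' = '\\' ∧ i + 1 < cs.length))
    (hq : cs.getD i ' ' = '\'' ∨ cs.getD i ' ' = '"') :
    pvMask cs i none start q = pvMask cs (i + 1) (some (cs.getD i ' ')) i q := by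
  conv_lhs => rw [pvMask.eq_def]
  rw [dif_pos h, if_neg hbs, if_pos hq]

theorem pvMask_default (cs : List Char) (i : Nat) (inq : Option Char) (start : Nat) (q : List Bool)
    (h : i < cs.length) (hbs : ¬(cs.getD i ' ' = '\\' ∧ i + 1 < cs.length))
    (hq : ¬(cs.getD i ' ' = '\'' ∨ cs.getD i ' ' = '"')) :
    pvMask cs i inq start q = pvMask cs (i + 1) inq start q := by
  conv_lhs => rw [pvMask.eq_def]
  rw [dif_pos h, if_neg hbs, if_neg hq]

theorem pvMask_open_close (cs : List Char) (i : Nat) (qc : Char) (start : Nat) (q : List Bool)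
    (h : i < cs.length) (hbs : ¬(cs.getD i ' ' = '\\' ∧ i + 1 < cs.length))
    (hqc : cs.getD i ' ' = '\'' ∨ cs.getD i ' ' = '"') (he : cs.getD i ' ' = qc) :
    pvMask cs i (some qc) start q = pvMask cs (i + 1) none start (pvMark q start (i + 1)) := by
  conv_lhs => rw [pvMask.eq_def]
  rw [dif_pos h, if_neg hbs, if_pos hqc]
  simp only [if_pos he]

theorem pvMask_open_step (cs : List Char) (i : Nat) (qc : Char) (start : Nat) (q : List Bool)
    (h : i < cs.length) (hbs : ¬(cs.getD i ' ' = '\\' ∧ i + 1 < cs.length))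
    (he : cs.getD i ' ' ≠ qc) :
    pvMask cs i (some qc) start q = pvMask cs (i + 1) (some qc) start q := by
  conv_lhs => rw [pvMask.eq_def]
  rw [dif_pos h, if_neg hbs]
  by_cases hqc : cs.getD i ' ' = '\'' ∨ cs.getD i ' ' = '"'
  · rw [if_pos hqc]
    simp only [if_neg he]
  · rw [if_neg hqc]

theorem pvMask_open (cs : List Char) (qc : Char) (hqc : qc = '\'' ∨ qc = '"') :
    ∀ k i start q, cs.length - i ≤ k →
      pvMask cs i (some qc) start q =
        (match pvClose cs qc i with
         | some j => pvMask cs (j + 1) none start (pvMark q start (j + 1))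
         | none => q) := by
  intro k
  induction k with
  | zero =>
      intro i start q hk
      rw [pvMask_ge cs i _ start q (by omega), pvClose_ge cs qc i (by omega)]
  | succ k ih =>
      intro i start q hk
      by_cases hl : i < cs.length
      · by_cases hbs : cs.getD i ' ' = '\\' ∧ i + 1 < cs.length
        · rw [pvMask_bs cs i _ start q hl hbs.1 hbs.2, pvClose_bs cs qc i hl hbs.1 hbs.2]
          exact ih (i + 2) start q (by omega)
        · by_cases he : cs.getD i ' ' = qc
          · rw [pvMask_open_close cs i qc start q hl hbs (by rw [he]; exact hqc) he,
              pvClose_self cs qc i hl hbs he]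
          · rw [pvMask_open_step cs i qc start q hl hbs he, pvClose_step cs qc i hl hbs he]
            exact ih (i + 1) start q (by omega)
      · rw [pvMask_ge cs i _ start q (by omega), pvClose_ge cs qc i (by omega)]

-- ---- mask ↔ region-list correspondence ----

theorem pvMaskInv (cs : List Char) :
    ∀ k i st start q, cs.length - i ≤ k → q.length = cs.length →
      ∀ p, p < cs.length →
        (pvMask cs i none start q).getD p false =
          (q.getD p false || pvInQ (p : Int) (pvFindQ cs i false false st [])) := by
  intro k
  induction k with
  | zero =>
      intro i st start q hk hlen p hp
      rw [pvMask_ge cs i none start q (by omega), pvFindQ_ge cs i false false st [] (by omega)]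
      simp [pvInQ]
  | succ k ih =>
      intro i st start q hk hlen p hp
      by_cases hl : i < cs.length
      · by_cases hbs : cs.getD i ' ' = '\\' ∧ i + 1 < cs.length
        · rw [pvMask_bs cs i none start q hl hbs.1 hbs.2,
            pvFindQ_bs cs i false false st [] hl hbs.1 hbs.2]
          exact ih (i + 2) st start q (by omega) hlen p hp
        · by_cases hq1 : cs.getD i ' ' = '\''
          · rw [pvMask_enter cs i start q hl hbs (Or.inl hq1), hq1,
              pvFindQ_enterS cs i st [] hl hbs hq1,
              pvMask_open cs '\'' (Or.inl rfl) cs.length (i + 1) i q (by omega)]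
            cases hcl : pvClose cs '\'' (i + 1) with
            | some j =>
                have hj := pvClose_spec cs '\'' cs.length (i + 1) j (by omega) hcl
                rw [pvFindQ_openS_some cs cs.length (i + 1) j ((i : Int)) [] (by omega) hcl,
                  pvFindQ_acc cs cs.length (j + 1) false false ((i : Int))
                    ([] ++ [((i : Int), (j : Int) + 1)]) (by omega)]
                simp only [List.nil_append, List.singleton_append]
                rw [ih (j + 1) ((i : Int)) i (pvMark q i (j + 1)) (by omega)
                  (by rw [pvMark_length]; exact hlen) p hp]
                rw [pvMark_getD q i (j + 1) p (by omega)]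
                simp only [pvInQ]
                by_cases hc : i ≤ p ∧ p < j + 1
                · rw [if_pos hc, if_pos (by constructor <;> omega)]
                  simp
                · rw [if_neg hc, if_neg (by omega)]
            | none =>
                rw [pvFindQ_openS_none cs cs.length (i + 1) ((i : Int)) [] (by omega) hcl]
                simp [pvInQ]
          · by_cases hq2 : cs.getD i ' ' = '"'
            · rw [pvMask_enter cs i start q hl hbs (Or.inr hq2), hq2,
                pvFindQ_enterD cs i st [] hl hbs hq2,
                pvMask_open cs '"' (Or.inr rfl) cs.length (i + 1) i q (by omega)]
              cases hcl : pvClose cs '"' (i + 1) with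
              | some j =>
                  have hj := pvClose_spec cs '"' cs.length (i + 1) j (by omega) hcl
                  rw [pvFindQ_openD_some cs cs.length (i + 1) j ((i : Int)) [] (by omega) hcl,
                    pvFindQ_acc cs cs.length (j + 1) false false ((i : Int))
                      ([] ++ [((i : Int), (j : Int) + 1)]) (by omega)]
                  simp only [List.nil_append, List.singleton_append]
                  rw [ih (j + 1) ((i : Int)) i (pvMark q i (j + 1)) (by omega)
                    (by rw [pvMark_length]; exact hlen) p hp]
                  rw [pvMark_getD q i (j + 1) p (by omega)]
                  simp only [pvInQ]
                  by_cases hc : i ≤ p ∧ p < j + 1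
                  · rw [if_pos hc, if_pos (by constructor <;> omega)]
                    simp
                  · rw [if_neg hc, if_neg (by omega)]
              | none =>
                  rw [pvFindQ_openD_none cs cs.length (i + 1) ((i : Int)) [] (by omega) hcl]
                  simp [pvInQ]
            · rw [pvMask_default cs i none start q hl hbs (by tauto),
                pvFindQ_default cs i st [] hl hbs hq1 hq2]
              exact ih (i + 1) st start q (by omega) hlen p hp
      · rw [pvMask_ge cs i none start q (by omega), pvFindQ_ge cs i false false st [] (by omega)]
        simp [pvInQ]

-- ---- pvScanA stepping ----

theorem pvScanA_ge (cs : List Char) (pos : Nat) (R : List (Int × Int)) (h : cs.length ≤ pos) :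
    pvScanA cs pos R = none := by
  rw [pvScanA, dif_pos (pvFind_ge cs pos h)]

theorem pvScanA_step (cs : List Char) (pos : Nat) (R : List (Int × Int)) (h : pos < cs.length)
    (hc : cs.getD pos ' ' ≠ '|') : pvScanA cs pos R = pvScanA cs (pos + 1) R := by
  conv_lhs => rw [pvScanA]
  rw [pvFind_step cs pos h hc]
  conv_rhs => rw [pvScanA]

theorem pvScanA_pipe (cs : List Char) (pos : Nat) (R : List (Int × Int)) (h : pos < cs.length)
    (hc : cs.getD pos ' ' = '|') :
    pvScanA cs pos R =
      if pvInQ (pos : Int) R = false then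
        if pos + 1 < cs.length ∧ cs.getD (pos + 1) ' ' = '|' then pvScanA cs (pos + 2) R
        else some (pos : Int)
      else pvScanA cs (pos + 1) R := by
  conv_lhs => rw [pvScanA]
  rw [pvFind_pipe cs pos h hc]
  rw [dif_neg (by omega : ¬((pos : Int) = -1))]
  simp only [Int.toNat_natCast]
  have hiff : ((pos : Int) + 1 < (cs.length : Int)) ↔ (pos + 1 < cs.length) := by omega
  simp only [hiff]

-- ---- scan equivalence given a pointwise-correct mask ----

theorem pvScan_eq (cs : List Char) (R : List (Int × Int)) (q : List Bool)
    (hq : ∀ p, p < cs.length → q.getD p false = pvInQ (p : Int) R) :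
    ∀ k i, cs.length - i ≤ k → pvScanA cs i R = pvScanB cs q i := by
  intro k
  induction k with
  | zero =>
      intro i hk
      rw [pvScanA_ge cs i R (by omega), pvScanB, dif_neg (by omega)]
  | succ k ih =>
      intro i hk
      by_cases hl : i < cs.length
      · by_cases hc : cs.getD i ' ' = '|'
        · rw [pvScanA_pipe cs i R hl hc]
          conv_rhs => rw [pvScanB]
          rw [dif_pos hl]
          have hm : q.getD i false = pvInQ (i : Int) R := hq i hl
          by_cases hin : pvInQ (i : Int) R = false
          · have hb : cs.getD i ' ' = '|' ∧ q.getD i false = false := ⟨hc, by rw [hm]; exact hin⟩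
            rw [if_pos hin, if_pos hb]
            by_cases hpp : i + 1 < cs.length ∧ cs.getD (i + 1) ' ' = '|'
            · rw [if_pos hpp, if_pos hpp]
              exact ih (i + 2) (by omega)
            · rw [if_neg hpp, if_neg hpp]
          · have hb : ¬(cs.getD i ' ' = '|' ∧ q.getD i false = false) :=
              fun hh => hin (by rw [← hm]; exact hh.2)
            rw [if_neg hin, if_neg hb]
            exact ih (i + 1) (by omega)
        · rw [pvScanA_step cs i R hl hc]
          conv_rhs => rw [pvScanB]
          rw [dif_pos hl, if_neg (fun hh => hc hh.1)]
          exact ih (i + 1) (by omega)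
      · rw [pvScanA_ge cs i R (by omega), pvScanB, dif_neg (by omega)]

-- ===== VERDICT (by name: the statement is the Claim_ definition above) =====
theorem find_first_unquoted_pipe_py_spec : Claim_equal_find_first_unquoted_pipe_py := by
  intro command _
  unfold Spec_find_first_unquoted_pipe_py find_first_unquoted_pipe_py find_first_unquoted_pipe_py_alt
  refine pvScan_eq command.toList _ _ (fun p hp => ?_) command.toList.length 0 (by omega)
  rw [pvMaskInv command.toList command.toList.length 0 (-1) 0
    (List.replicate command.toList.length false) (by omega) (by simp) p hp]
  simp
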